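-- pv_equiv track=rewrite | github.com/kenndanielso/kcs_app | app/summarizer.py | doc2vec_tokenizeText
-- ===== SOURCE A (Python) =====
-- def doc2vec_tokenizeText(corpus):
--     punctuation = """.,?!:;(){}[]"""
--     corpus = [z.lower().replace('\n','') for z in corpus]
--     corpus = [z.replace('<br />', ' ') for z in corpus]
--
--     #treat punctuation as individual words
--     for c in punctuation:
--         corpus = [z.replace(c, ' %s '%c) for z in corpus]
--     corpus = [z.split() for z in corpus]
--     return corpus
-- ===== SOURCE B (Python) =====
-- def doc2vec_tokenizeText(corpus):
--     punct = set('.,?!:;(){}[]')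
--     out = []
--     for z in corpus:
--         z = z.lower().replace('\n', '').replace('<br />', ' ')
--         buf = []
--         for ch in z:
--             if ch in punct:
--                 buf.append(' ')
--                 buf.append(ch)
--                 buf.append(' ')
--             else:
--                 buf.append(ch)
--         out.append(''.join(buf).split())
--     return out
-- ===== Notes on version B (the rewrite author's own statement) =====
-- stated objective: faster
-- what changed: Replaces the twelve sequential full-string .replace passes (one per punctuation char) with a single character scan per string that pads any punctuation char with spaces via a set membership test, in one loop over the corpus.
import Mathlib
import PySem

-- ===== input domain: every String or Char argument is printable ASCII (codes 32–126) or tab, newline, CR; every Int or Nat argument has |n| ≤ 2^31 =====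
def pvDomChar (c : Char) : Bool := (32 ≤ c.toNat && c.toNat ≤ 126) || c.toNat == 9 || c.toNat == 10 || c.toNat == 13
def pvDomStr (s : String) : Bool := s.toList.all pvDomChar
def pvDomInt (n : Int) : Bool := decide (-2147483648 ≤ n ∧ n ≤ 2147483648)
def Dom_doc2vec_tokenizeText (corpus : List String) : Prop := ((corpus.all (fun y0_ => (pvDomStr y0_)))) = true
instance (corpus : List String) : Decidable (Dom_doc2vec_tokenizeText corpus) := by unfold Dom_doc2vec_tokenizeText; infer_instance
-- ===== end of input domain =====

-- B replaces the twelve sequential full-string replace passes with one character scan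
-- per string (set membership deciding whether a char is padded with spaces): objective "faster" (constant factor).

-- ===== PORT A =====
def doc2vec_tokenizeText (corpus : List String) : List (List String) :=
  let punctuation : String := ".,?!:;(){}[]"
  let corpus1 := corpus.map (fun z => PySem.Str.replace (PySem.Str.lower z) "\n" "")
  let corpus2 := corpus1.map (fun z => PySem.Str.replace z "<br />" " ")
  let corpus3 := punctuation.toList.foldl
      (fun cor c => cor.map (fun z =>
        PySem.Str.replace z (String.singleton c) (" " ++ String.singleton c ++ " "))) corpus2
  corpus3.map (fun z => PySem.Str.split₀ z)

-- ===== PORT B =====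
def pvPunct : PySem.Set Char := PySem.Set.ofList ".,?!:;(){}[]".toList

def doc2vec_tokenizeText_alt (corpus : List String) : List (List String) :=
  corpus.map (fun z =>
    let z2 := PySem.Str.replace (PySem.Str.replace (PySem.Str.lower z) "\n" "") "<br />" " "
    -- the single char scan building buf (Python's append loop, as a flatMap over the chars)
    let buf := z2.toList.flatMap (fun ch =>
      if pvPunct.contains ch then [' ', ch, ' '] else [ch])
    PySem.Str.split₀ (String.ofList buf))

-- ===== PRECONDITION & SPEC =====
def Spec_doc2vec_tokenizeText (corpus : List String) (out : List (List String)) : Prop := out = doc2vec_tokenizeText_alt corpus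
instance (corpus : List String) (out : List (List String)) : Decidable (Spec_doc2vec_tokenizeText corpus out) := by unfold Spec_doc2vec_tokenizeText; infer_instance

-- ===== CLAIM (what is proved, stated in full; the proofs are below) =====
def Claim_equal_doc2vec_tokenizeText : Prop := ∀ (corpus : List String), Dom_doc2vec_tokenizeText corpus → Spec_doc2vec_tokenizeText corpus (doc2vec_tokenizeText corpus)

-- ===== LEMMAS AND PROOFS =====

-- single-char-pattern replace.go is the obvious per-character expansion
theorem pv_replace_go_single (c : Char) (new : List Char) :
    ∀ (fuel : Nat) (l acc : List Char), l.length ≤ fuel →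
      PySem.Chars.replace.go [c] new fuel l acc
        = acc.reverse ++ l.flatMap (fun y => if y = c then new else [y]) := by
  intro fuel
  induction fuel with
  | zero =>
    intro l acc h
    have hl : l = [] := List.eq_nil_of_length_eq_zero (Nat.le_zero.mp h)
    subst hl; simp [PySem.Chars.replace.go]
  | succ n ih =>
    intro l acc h
    cases l with
    | nil => simp [PySem.Chars.replace.go]
    | cons x t =>
      by_cases hx : x = c
      · subst hx
        have : List.isPrefixOf [x] (x :: t) = true := by
          simp [List.isPrefixOf]
        rw [PySem.Chars.replace.go]
        simp only [this]
        have hd : List.drop [x].length (x :: t) = t := rfl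
        simp only [List.length_cons] at h
        rw [if_pos trivial, hd, ih t (new.reverse ++ acc) (Nat.le_of_succ_le_succ h)]
        simp
      · have : List.isPrefixOf [c] (x :: t) = false := by
          simp [List.isPrefixOf]; exact fun hc => absurd hc.symm hx
        rw [PySem.Chars.replace.go]
        simp only [this, Bool.false_eq_true, if_false]
        simp only [List.length_cons] at h
        rw [ih t (x :: acc) (Nat.le_of_succ_le_succ h)]
        simp [hx]

theorem pv_replace_single (c : Char) (new s : List Char) :
    PySem.Chars.replace s [c] new = s.flatMap (fun y => if y = c then new else [y]) := by
  unfold PySem.Chars.replace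
  simp only [List.isEmpty_cons, Bool.false_eq_true, if_false]
  simpa using pv_replace_go_single c new s.length s [] le_rfl

-- the char-level step a single punctuation replace performs
def pvStep (s : List Char) (c : Char) : List Char :=
  s.flatMap (fun y => if y = c then [' ', c, ' '] else [y])

-- folding flat-map steps distributes over the characters
theorem pv_foldl_hom (ps : List Char) :
    ∀ s : List Char, List.foldl pvStep s ps = s.flatMap (fun x => List.foldl pvStep [x] ps) := by
  induction ps with
  | nil => intro s; simp
  | cons p ps ih =>
    intro s
    simp only [List.foldl_cons]
    rw [ih (pvStep s p)]
    show (s.flatMap _).flatMap _ = _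
    rw [List.flatMap_assoc]
    congr 1; funext x
    rw [ih (pvStep [x] p)]
    simp [pvStep]

theorem pv_triple_fixed (p : Char) :
    ∀ ps : List Char, p ∉ ps → ' ' ∉ ps →
      List.foldl pvStep [' ', p, ' '] ps = [' ', p, ' '] := by
  intro ps
  induction ps with
  | nil => intro _ _; rfl
  | cons q qs ih =>
    intro hp hsp
    have hq : p ≠ q := fun h => hp (h ▸ List.mem_cons_self)
    have hs : ' ' ≠ q := fun h => hsp (h ▸ List.mem_cons_self)
    simp only [List.foldl_cons]
    have : pvStep [' ', p, ' '] q = [' ', p, ' '] := by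
      simp [pvStep, if_neg hq, if_neg hs]
    rw [this]
    exact ih (fun h => hp (List.mem_cons_of_mem _ h)) (fun h => hsp (List.mem_cons_of_mem _ h))

theorem pv_single_eval (x : Char) :
    ∀ ps : List Char, ps.Nodup → ' ' ∉ ps →
      List.foldl pvStep [x] ps = if x ∈ ps then [' ', x, ' '] else [x] := by
  intro ps
  induction ps with
  | nil => intro _ _; simp
  | cons p qs ih =>
    intro hnd hsp
    have hnd' := hnd.of_cons
    have hpq : p ∉ qs := (List.nodup_cons.mp hnd).1
    have hsq : ' ' ∉ qs := fun h => hsp (List.mem_cons_of_mem _ h)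
    simp only [List.foldl_cons]
    by_cases hx : x = p
    · subst hx
      have : pvStep [x] x = [' ', x, ' '] := by simp [pvStep]
      rw [this, pv_triple_fixed x qs hpq hsq]
      simp
    · have : pvStep [x] p = [x] := by simp [pvStep, hx]
      rw [this, ih hnd' hsq]
      simp [List.mem_cons, hx]

-- evaluation on the concrete punctuation list = B's per-char expansion
theorem pv_punct_eval (x : Char) :
    List.foldl pvStep [x] ".,?!:;(){}[]".toList
      = if pvPunct.contains x then [' ', x, ' '] else [x] := by
  rw [pv_single_eval x _ (by decide) (by decide)]
  by_cases hx : x ∈ ".,?!:;(){}[]".toList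
  · rw [if_pos hx, if_pos]
    simpa [pvPunct, PySem.Set.contains] using (PySem.Set.mem_ofList _ x).mpr hx
  · rw [if_neg hx, if_neg]
    intro hc
    exact hx ((PySem.Set.mem_ofList _ x).mp (by simpa [pvPunct, PySem.Set.contains] using hc))

-- the corpus-level foldl of maps is a map of string-level foldls
theorem pv_foldl_map (g : Char → String → String) (ps : List Char) :
    ∀ l : List String,
      List.foldl (fun cor c => cor.map (g c)) l ps
        = l.map (fun z => List.foldl (fun z c => g c z) z ps) := by
  induction ps with
  | nil => intro l; simp
  | cons p qs ih =>
    intro l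
    simp only [List.foldl_cons]
    rw [ih (l.map (g p)), List.map_map]
    rfl

-- string-level foldl of replaces, seen on the char list
theorem pv_string_foldl (ps : List Char) :
    ∀ s : String,
      (List.foldl (fun z c =>
          PySem.Str.replace z (String.singleton c) (" " ++ String.singleton c ++ " ")) s ps).toList
        = List.foldl pvStep s.toList ps := by
  induction ps with
  | nil => intro s; rfl
  | cons p qs ih =>
    intro s
    simp only [List.foldl_cons]
    rw [ih]
    congr 1
    rw [PySem.Str.toList_replace]
    have h1 : (String.singleton p).toList = [p] := by simp
    have h2 : (" " ++ String.singleton p ++ " ").toList = [' ', p, ' '] := by simp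
    rw [h1, h2, pv_replace_single]
    rfl

theorem pv_hchars (z2 : String) :
    (List.foldl (fun z c =>
      PySem.Str.replace z (String.singleton c) (" " ++ String.singleton c ++ " ")) z2
        ".,?!:;(){}[]".toList).toList
      = z2.toList.flatMap (fun ch => if pvPunct.contains ch then [' ', ch, ' '] else [ch]) := by
  rw [pv_string_foldl, pv_foldl_hom]
  exact List.flatMap_congr (fun x _ => pv_punct_eval x)

theorem pv_per_string (z2 : String) :
    PySem.Str.split₀ (List.foldl (fun z c =>
        PySem.Str.replace z (String.singleton c) (" " ++ String.singleton c ++ " ")) z2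
          ".,?!:;(){}[]".toList)
      = PySem.Str.split₀ (String.ofList
          (z2.toList.flatMap (fun ch => if pvPunct.contains ch then [' ', ch, ' '] else [ch]))) := by
  unfold PySem.Str.split₀
  rw [pv_hchars]
  simp

-- ===== VERDICT (by name: the statement is the Claim_ definition above) =====
theorem doc2vec_tokenizeText_spec : Claim_equal_doc2vec_tokenizeText := by
  intro corpus _
  show doc2vec_tokenizeText corpus = doc2vec_tokenizeText_alt corpus
  unfold doc2vec_tokenizeText doc2vec_tokenizeText_alt
  dsimp only
  rw [pv_foldl_map]
  simp only [List.map_map]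
  apply List.map_congr_left
  intro z _
  simp only [Function.comp_def]
  exact pv_per_string _
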